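-- pv_equiv track=rewrite | github.com/appinha/advent_of_code-2015 | my_solutions/day_08/main.py | _encode_strings
-- ===== SOURCE A (Python) =====
-- def _encode_strings(strings):
--     encoded_strings = []
--     for string in strings:
--         string = string.replace('\\"', '///"')
--         string = string.replace('\\x', '//x')
--         string = string.replace('\\', '//')
--         string = '/"' + string + '/"'
--         encoded_strings.append(string)
--     return encoded_strings
-- ===== SOURCE B (Python) =====
-- def _encode_strings(strings):
--     encoded_strings = []
--     for string in strings:
--         buf = []
--         i = 0
--         n = len(string)
--         while i < n:
--             ch = string[i]
--             if ch == '\\':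
--                 nxt = string[i + 1] if i + 1 < n else None
--                 if nxt == '"':
--                     buf.append('///"')
--                     i += 2
--                 elif nxt == 'x':
--                     buf.append('//x')
--                     i += 2
--                 else:
--                     buf.append('//')
--                     i += 1
--             else:
--                 buf.append(ch)
--                 i += 1
--         encoded_strings.append('/"' + ''.join(buf) + '/"')
--     return encoded_strings
-- ===== Notes on version B (the rewrite author's own statement) =====
-- stated objective: alternative
-- what changed: Replaces the three sequential full-string str.replace passes per string with one left-to-right scan that dispatches on a backslash's lookahead character, building the encoded string in a single pass.
import Mathlib
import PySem

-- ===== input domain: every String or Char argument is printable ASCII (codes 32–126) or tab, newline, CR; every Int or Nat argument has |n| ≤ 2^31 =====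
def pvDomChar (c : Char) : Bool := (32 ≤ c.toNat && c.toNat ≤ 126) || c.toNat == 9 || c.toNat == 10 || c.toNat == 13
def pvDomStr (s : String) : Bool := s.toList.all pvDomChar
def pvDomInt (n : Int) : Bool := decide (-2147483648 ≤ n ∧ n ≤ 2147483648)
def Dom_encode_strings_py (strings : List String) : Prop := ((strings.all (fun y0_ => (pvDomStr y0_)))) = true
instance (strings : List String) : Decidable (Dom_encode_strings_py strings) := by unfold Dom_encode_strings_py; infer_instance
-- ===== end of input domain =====

-- B replaces A's three sequential str.replace passes per string by one left-to-right
-- lookahead scan (alternative decomposition, same asymptotic cost).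


-- ===== PORT A =====
-- per-string body of A's loop: three sequential replaces, then wrap with '/"'
-- ('+' on Python str is concatenation; written via String.ofList/toList because
-- Lean's own String.append is kernel-opaque — the value is exactly '/"'+s3+'/"')
def pvEncA (s : String) : String :=
  let s1 := PySem.Str.replace s "\\\"" "///\""
  let s2 := PySem.Str.replace s1 "\\x" "//x"
  let s3 := PySem.Str.replace s2 "\\" "//"
  String.ofList ('/' :: '"' :: s3.toList ++ ['/', '"'])

def encode_strings_py (strings : List String) : List String :=
  strings.foldl (fun acc string => acc ++ [pvEncA string]) []

-- ===== PORT B =====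
-- B's while-loop over the index i, as the obvious structural recursion over the
-- remaining characters: on '\', dispatch on the lookahead character.
def pvScanB : List Char → List Char
  | [] => []
  | '\\' :: '"' :: t => '/' :: '/' :: '/' :: '"' :: pvScanB t
  | '\\' :: 'x' :: t => '/' :: '/' :: 'x' :: pvScanB t
  | '\\' :: rest => '/' :: '/' :: pvScanB rest
  | c :: rest => c :: pvScanB rest

def pvEncB (s : String) : String :=
  String.ofList ('/' :: '"' :: pvScanB s.toList ++ ['/', '"'])

def encode_strings_py_alt (strings : List String) : List String :=
  strings.map pvEncB

-- ===== PRECONDITION & SPEC =====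
def Spec_encode_strings_py (strings : List String) (out : List String) : Prop := out = encode_strings_py_alt strings
instance (strings : List String) (out : List String) : Decidable (Spec_encode_strings_py strings out) := by unfold Spec_encode_strings_py; infer_instance

-- ===== CLAIM (what is proved, stated in full; the proofs are below) =====
def Claim_equal_encode_strings_py : Prop := ∀ (strings : List String), Dom_encode_strings_py strings → Spec_encode_strings_py strings (encode_strings_py strings)

-- ===== LEMMAS AND PROOFS =====

-- fuel-free forms of the three specific replaces A performs
def pvRep1 : List Char → List Char
  | [] => []
  | [c] => [c]
  | c :: d :: t =>
    if c = '\\' ∧ d = '"' then '/' :: '/' :: '/' :: '"' :: pvRep1 t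
    else c :: pvRep1 (d :: t)

def pvRep2 : List Char → List Char
  | [] => []
  | [c] => [c]
  | c :: d :: t =>
    if c = '\\' ∧ d = 'x' then '/' :: '/' :: 'x' :: pvRep2 t
    else c :: pvRep2 (d :: t)

def pvRep3 : List Char → List Char
  | [] => []
  | c :: t => if c = '\\' then '/' :: '/' :: pvRep3 t else c :: pvRep3 t

lemma go1_eq : ∀ (fuel : Nat) (cs acc : List Char), cs.length ≤ fuel →
    PySem.Chars.replace.go ['\\', '"'] ['/', '/', '/', '"'] fuel cs acc
      = acc.reverse ++ pvRep1 cs := by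
  intro fuel
  induction fuel with
  | zero =>
    intro cs acc h
    have : cs = [] := List.eq_nil_of_length_eq_zero (Nat.le_zero.mp h)
    subst this; simp [PySem.Chars.replace.go, pvRep1]
  | succ n ih =>
    intro cs acc h
    match cs with
    | [] => simp [PySem.Chars.replace.go, pvRep1]
    | [c] =>
      have hpre : (['\\', '"'] : List Char).isPrefixOf [c] = false := by
        simp [List.isPrefixOf]
      rw [PySem.Chars.replace.go]
      simp only [hpre, Bool.false_eq_true, if_false]
      rw [ih [] (c :: acc) (by simp)]
      simp [pvRep1]
    | c :: d :: t =>
      by_cases hcd : c = '\\' ∧ d = '"'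
      · obtain ⟨hc, hd⟩ := hcd; subst hc; subst hd
        rw [PySem.Chars.replace.go]
        have hpre : (['\\', '"'] : List Char).isPrefixOf ('\\' :: '"' :: t) = true := by
          simp [List.isPrefixOf]
        simp only [hpre, if_true]
        rw [ih _ _ (by simp at h ⊢; omega)]
        simp [pvRep1]
      · rw [PySem.Chars.replace.go]
        have hpre : (['\\', '"'] : List Char).isPrefixOf (c :: d :: t) = false := by
          simp [List.isPrefixOf]; intro hc hd; exact hcd ⟨hc.symm, hd.symm⟩
        simp only [hpre, Bool.false_eq_true, if_false]
        rw [ih _ _ (by simp at h ⊢; omega)]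
        simp [pvRep1, hcd]

lemma go2_eq : ∀ (fuel : Nat) (cs acc : List Char), cs.length ≤ fuel →
    PySem.Chars.replace.go ['\\', 'x'] ['/', '/', 'x'] fuel cs acc
      = acc.reverse ++ pvRep2 cs := by
  intro fuel
  induction fuel with
  | zero =>
    intro cs acc h
    have : cs = [] := List.eq_nil_of_length_eq_zero (Nat.le_zero.mp h)
    subst this; simp [PySem.Chars.replace.go, pvRep2]
  | succ n ih =>
    intro cs acc h
    match cs with
    | [] => simp [PySem.Chars.replace.go, pvRep2]
    | [c] =>
      have hpre : (['\\', 'x'] : List Char).isPrefixOf [c] = false := by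
        simp [List.isPrefixOf]
      rw [PySem.Chars.replace.go]
      simp only [hpre, Bool.false_eq_true, if_false]
      rw [ih [] (c :: acc) (by simp)]
      simp [pvRep2]
    | c :: d :: t =>
      by_cases hcd : c = '\\' ∧ d = 'x'
      · obtain ⟨hc, hd⟩ := hcd; subst hc; subst hd
        rw [PySem.Chars.replace.go]
        have hpre : (['\\', 'x'] : List Char).isPrefixOf ('\\' :: 'x' :: t) = true := by
          simp [List.isPrefixOf]
        simp only [hpre, if_true]
        rw [ih _ _ (by simp at h ⊢; omega)]
        simp [pvRep2]
      · rw [PySem.Chars.replace.go]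
        have hpre : (['\\', 'x'] : List Char).isPrefixOf (c :: d :: t) = false := by
          simp [List.isPrefixOf]; intro hc hd; exact hcd ⟨hc.symm, hd.symm⟩
        simp only [hpre, Bool.false_eq_true, if_false]
        rw [ih _ _ (by simp at h ⊢; omega)]
        simp [pvRep2, hcd]

lemma go3_eq : ∀ (fuel : Nat) (cs acc : List Char), cs.length ≤ fuel →
    PySem.Chars.replace.go ['\\'] ['/', '/'] fuel cs acc
      = acc.reverse ++ pvRep3 cs := by
  intro fuel
  induction fuel with
  | zero =>
    intro cs acc h
    have : cs = [] := List.eq_nil_of_length_eq_zero (Nat.le_zero.mp h)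
    subst this; simp [PySem.Chars.replace.go, pvRep3]
  | succ n ih =>
    intro cs acc h
    match cs with
    | [] => simp [PySem.Chars.replace.go, pvRep3]
    | c :: t =>
      by_cases hc : c = '\\'
      · subst hc
        rw [PySem.Chars.replace.go]
        have hpre : (['\\'] : List Char).isPrefixOf ('\\' :: t) = true := by
          simp [List.isPrefixOf]
        simp only [hpre, if_true]
        rw [ih _ _ (by simp at h ⊢; omega)]
        simp [pvRep3]
      · rw [PySem.Chars.replace.go]
        have hpre : (['\\'] : List Char).isPrefixOf (c :: t) = false := by
          simp [List.isPrefixOf]; exact fun h => hc h.symm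
        simp only [hpre, Bool.false_eq_true, if_false]
        rw [ih _ _ (by simp at h ⊢; omega)]
        simp [pvRep3, hc]

lemma rep1_replace (cs : List Char) :
    PySem.Chars.replace cs ['\\', '"'] ['/', '/', '/', '"'] = pvRep1 cs := by
  rw [PySem.Chars.replace]
  simp only [List.isEmpty_cons, if_false, Bool.false_eq_true]
  exact go1_eq cs.length cs [] le_rfl

lemma rep2_replace (cs : List Char) :
    PySem.Chars.replace cs ['\\', 'x'] ['/', '/', 'x'] = pvRep2 cs := by
  rw [PySem.Chars.replace]
  simp only [List.isEmpty_cons, if_false, Bool.false_eq_true]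
  exact go2_eq cs.length cs [] le_rfl

lemma rep3_replace (cs : List Char) :
    PySem.Chars.replace cs ['\\'] ['/', '/'] = pvRep3 cs := by
  rw [PySem.Chars.replace]
  simp only [List.isEmpty_cons, if_false, Bool.false_eq_true]
  exact go3_eq cs.length cs [] le_rfl

-- pushing a non-matching head through pvRep1 / pvRep2
lemma rep1_cons_ne (c : Char) (w : List Char) (h : ¬ (c = '\\' ∧ w.head? = some '"')) :
    pvRep1 (c :: w) = c :: pvRep1 w := by
  match w with
  | [] => simp [pvRep1]
  | d :: t =>
    have : ¬ (c = '\\' ∧ d = '"') := by simpa using h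
    simp [pvRep1, this]

lemma rep2_cons_ne (c : Char) (w : List Char) (h : ¬ (c = '\\' ∧ w.head? = some 'x')) :
    pvRep2 (c :: w) = c :: pvRep2 w := by
  match w with
  | [] => simp [pvRep2]
  | d :: t =>
    have : ¬ (c = '\\' ∧ d = 'x') := by simpa using h
    simp [pvRep2, this]

-- head of pvRep1 keeps a non-'"' non-'x' head distinguishable from 'x'
lemma rep1_head_ne_x (w : List Char) (h : w.head? ≠ some 'x') :
    (pvRep1 w).head? ≠ some 'x' := by
  match w with
  | [] => simp [pvRep1]
  | [c] => simpa [pvRep1] using h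
  | c :: d :: t =>
    by_cases hcd : c = '\\' ∧ d = '"'
    · simp [pvRep1, hcd]
    · rw [show pvRep1 (c :: d :: t) = c :: pvRep1 (d :: t) by simp [pvRep1, hcd]]
      simpa using h

-- the composition of the three replaces is B's single scan
lemma comp_eq (cs : List Char) : pvRep3 (pvRep2 (pvRep1 cs)) = pvScanB cs := by
  induction cs using pvScanB.induct with
  | case1 => simp [pvRep1, pvRep2, pvRep3, pvScanB]
  | case2 t ih =>
    rw [show pvRep1 ('\\' :: '"' :: t) = '/' :: '/' :: '/' :: '"' :: pvRep1 t by
      simp [pvRep1]]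
    rw [rep2_cons_ne _ _ (by simp), rep2_cons_ne _ _ (by simp),
        rep2_cons_ne _ _ (by simp), rep2_cons_ne '"' _ (by simp)]
    simp [pvRep3, pvScanB, ih]
  | case3 t ih =>
    rw [rep1_cons_ne '\\' _ (by simp), rep1_cons_ne 'x' _ (by
      rintro ⟨h, -⟩; exact absurd h (by decide))]
    rw [show pvRep2 ('\\' :: 'x' :: pvRep1 t) = '/' :: '/' :: 'x' :: pvRep2 (pvRep1 t) by
      simp [pvRep2]]
    simp [pvRep3, pvScanB, ih]
  | case4 rest hq' hx' ih =>
    have hq : rest.head? ≠ some '"' := by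
      cases rest with
      | nil => simp
      | cons d t => intro h; simp only [List.head?_cons, Option.some.injEq] at h; exact hq' t (by rw [h])
    have hx : rest.head? ≠ some 'x' := by
      cases rest with
      | nil => simp
      | cons d t => intro h; simp only [List.head?_cons, Option.some.injEq] at h; exact hx' t (by rw [h])
    rw [rep1_cons_ne '\\' _ (by rintro ⟨-, h⟩; exact hq h)]
    rw [rep2_cons_ne '\\' _ (by rintro ⟨-, h⟩; exact rep1_head_ne_x rest hx h)]
    rw [show pvRep3 ('\\' :: pvRep2 (pvRep1 rest)) = '/' :: '/' :: pvRep3 (pvRep2 (pvRep1 rest)) by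
      simp [pvRep3]]
    rw [ih]
    match rest, hq', hx' with
    | [], _, _ => simp [pvScanB]
    | d :: t, hq', hx' =>
      have h1 : d ≠ '"' := fun h => hq' t (by rw [h])
      have h2 : d ≠ 'x' := fun h => hx' t (by rw [h])
      rw [show pvScanB ('\\' :: d :: t) = '/' :: '/' :: pvScanB (d :: t) by
        conv_lhs => rw [pvScanB.eq_def]
        split <;> simp_all [eq_comm]]
  | case5 c rest h1 h2 hc ih =>
    have hc' : c ≠ '\\' := fun h => hc h
    rw [rep1_cons_ne c _ (by rintro ⟨h, -⟩; exact hc' h)]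
    rw [rep2_cons_ne c _ (by rintro ⟨h, -⟩; exact hc' h)]
    rw [show pvRep3 (c :: pvRep2 (pvRep1 rest)) = c :: pvRep3 (pvRep2 (pvRep1 rest)) by
      simp [pvRep3, hc']]
    rw [ih]
    conv_rhs => rw [pvScanB.eq_def]
    split <;> simp_all

lemma enc_eq (s : String) : pvEncA s = pvEncB s := by
  simp only [pvEncA, pvEncB]
  have h1 : (PySem.Str.replace s "\\\"" "///\"").toList
      = pvRep1 s.toList := by
    rw [PySem.Str.toList_replace]; exact rep1_replace s.toList
  have h2 : (PySem.Str.replace (PySem.Str.replace s "\\\"" "///\"") "\\x" "//x").toList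
      = pvRep2 (pvRep1 s.toList) := by
    rw [PySem.Str.toList_replace, h1]; exact rep2_replace _
  have h3 : (PySem.Str.replace (PySem.Str.replace (PySem.Str.replace s "\\\"" "///\"") "\\x" "//x") "\\" "//").toList
      = pvRep3 (pvRep2 (pvRep1 s.toList)) := by
    rw [PySem.Str.toList_replace, h2]; exact rep3_replace _
  rw [h3, comp_eq]

-- ===== VERDICT (by name: the statement is the Claim_ definition above) =====
theorem encode_strings_py_spec : Claim_equal_encode_strings_py := by
  intro strings _
  unfold Spec_encode_strings_py encode_strings_py encode_strings_py_alt
  rw [PySem.List.foldl_append_singleton_eq_map]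
  exact List.map_congr_left fun s _ => enc_eq s
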